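-- pv_equiv track=rewrite | github.com/Jonggil-dev/Algo | 원종현/프로그래머스/42891_2019KAKAO_무지의먹방라이브.py | solution
-- ===== SOURCE A (Python) =====
-- from collections import deque
--
-- def solution(food_times, k):
--     answer = 0
--     q=deque(sorted(food_times))
--     d=0
--     if sum(food_times)<=k:
--         return -1
--     while True:
--         tot_food=len(q)
--         if k<tot_food:
--             break
--         if q[0]-d>k//tot_food:
--             k-=(k//tot_food)*tot_food
--             d+=(k//tot_food)
--         else:
--             k-=(q[0]-d)*tot_food
--             d+=(q[0]-d)
--             now=q.popleft()
--             while now==q[0]: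
--                 q.popleft()
--     for i in range(len(food_times)):
--         if food_times[i]>d:
--             k-=1
--         if k<0:
--             answer=i+1
--             break
--     return answer
-- ===== SOURCE B (Python) =====
-- from collections import Counter
--
-- def solution(food_times, k):
--     if sum(food_times) <= k:
--         return -1
--     c = Counter(food_times)
--     d = 0
--     rem = len(food_times)
--     for v in sorted(c):
--         if k < rem or (v - d) * rem > k:
--             break
--         k -= (v - d) * rem
--         d = v
--         rem -= c[v]
--     if 0 < rem <= k:
--         k %= rem
--     cnt = 0
--     for i, t in enumerate(food_times):
--         if t > d:
--             cnt += 1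
--         if cnt > k:
--             return i + 1
--     return 0
-- ===== Notes on version B (the rewrite author's own statement) =====
-- stated objective: alternative
-- what changed: Replaces the deque simulation (pop-and-dedup of a sorted multiset, in-loop k adjustments, decrementing final scan) by a Counter histogram: walk the sorted distinct time levels with remaining-count bookkeeping from the counter, apply one modulo after the walk, and pick the answer by a prefix survivor-count threshold scan.
import Mathlib
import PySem

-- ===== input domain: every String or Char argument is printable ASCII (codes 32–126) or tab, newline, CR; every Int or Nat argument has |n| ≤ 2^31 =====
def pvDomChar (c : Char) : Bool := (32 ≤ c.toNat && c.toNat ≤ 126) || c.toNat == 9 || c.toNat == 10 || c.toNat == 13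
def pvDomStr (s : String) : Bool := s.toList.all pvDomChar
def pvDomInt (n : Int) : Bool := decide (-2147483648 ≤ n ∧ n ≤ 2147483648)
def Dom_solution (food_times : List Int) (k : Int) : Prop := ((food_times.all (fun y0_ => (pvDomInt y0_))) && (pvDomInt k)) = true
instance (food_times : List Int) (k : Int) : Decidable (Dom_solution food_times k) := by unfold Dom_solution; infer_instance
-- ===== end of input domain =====

-- B replaces A's deque simulation by a Counter-histogram walk over the distinct sorted time
-- levels, one modulo after the walk, and a prefix survivor-count final scan (objective: alternative).

-- ===== PORT A =====

-- A's inner 'while now==q[0]: q.popleft()' (on the deque after the first popleft);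
-- on an empty deque Python's q[0] would raise IndexError — unreachable behind A's sum guard —
-- the port returns [] there.
def popEqA (v : Int) : List Int → List Int
  | [] => []
  | x :: xs => if x == v then popEqA v xs else x :: xs

theorem popEqA_length_le (v : Int) : ∀ l : List Int, (popEqA v l).length ≤ l.length := by
  intro l; induction l with
  | nil => simp [popEqA]
  | cons x xs ih =>
    simp only [popEqA]; split
    · simp; omega
    · simp

-- A's 'while True' loop, returning the state (d, k) at 'break'.
-- The '[] with 0 ≤ k' case is unreachable behind A's sum guard (Python would raise IndexError
-- there); the port returns (d, k) as in the reachable '[] with k < 0' break.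
def loopA : List Int → Int → Int → Int × Int
  | [], d, k => (d, k)
  | q0 :: rest, d, k =>
    let tot : Int := (q0 :: rest).length
    if k < tot then (d, k)
    else if q0 - d > PySem.Int.floordiv k tot then
      let k' := k - (PySem.Int.floordiv k tot) * tot
      let d' := d + PySem.Int.floordiv k' tot
      loopA (q0 :: rest) d' k'
    else
      let k' := k - (q0 - d) * tot
      let d' := d + (q0 - d)
      loopA (popEqA q0 rest) d' k'
  termination_by q _ k => (if k < (q.length : Int) then q.length else q.length + 1)
  decreasing_by
  · rename_i h _
    have h' : ¬ k < (((q0 :: rest).length : Nat) : Int) := h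
    have hpos : (0:Int) < (((q0 :: rest).length : Nat) : Int) := by
      simp only [List.length_cons]; positivity
    have hk := PySem.Int.floordiv_mul_add_mod k (((q0 :: rest).length : Nat) : Int)
    have hlt : PySem.Int.mod k (((q0 :: rest).length : Nat) : Int) < (((q0 :: rest).length : Nat) : Int) := by
      rw [PySem.Int.mod_eq_emod_of_pos hpos]
      exact Int.emod_lt_of_pos _ hpos
    split_ifs <;> omega
  · rename_i h _
    have h' : ¬ k < (((q0 :: rest).length : Nat) : Int) := h
    have := popEqA_length_le q0 rest
    have hlen : (popEqA q0 rest).length < (q0 :: rest).length := by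
      simp only [List.length_cons]; omega
    split_ifs <;> omega

-- A's final 'for i in range(len(food_times))' with early break; answer defaults to 0
def scanA : List Int → Int → Int → Int → Int
  | [], _, _, _ => 0
  | t :: rest, i, d, k =>
    let k' := if t > d then k - 1 else k
    if k' < 0 then i + 1 else scanA rest (i + 1) d k'

def solution (food_times : List Int) (k : Int) : Int :=
  let q := PySem.List.sorted food_times (fun x => x) false
  let d : Int := 0
  if food_times.sum ≤ k then -1
  else
    let dk := loopA q d k
    scanA food_times 0 dk.1 dk.2

-- ===== PORT B =====

-- Source B's 'for v in sorted(c)' with break, over the state (d, k, rem)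
def loopB (c : PySem.Dict Int Int) : List Int → Int → Int → Int → Int × Int × Int
  | [], d, k, rem => (d, k, rem)
  | v :: rest, d, k, rem =>
    if k < rem ∨ (v - d) * rem > k then (d, k, rem)
    else loopB c rest v (k - (v - d) * rem) (rem - c.getD v 0)

-- Source B's 'for i, t in enumerate(food_times)' with early return, over the counter cnt
def scanB : List Int → Int → Int → Int → Int → Int
  | [], _, _, _, _ => 0
  | t :: rest, i, d, k, cnt =>
    let cnt' := if t > d then cnt + 1 else cnt
    if cnt' > k then i + 1 else scanB rest (i + 1) d k cnt'

def solution_alt (food_times : List Int) (k : Int) : Int :=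
  if food_times.sum ≤ k then -1
  else
    let c := PySem.Dict.counter food_times
    let r := loopB c (PySem.List.sorted c.keys (fun x => x) false) 0 k (food_times.length : Int)
    let k1 := if 0 < r.2.2 ∧ r.2.2 ≤ r.2.1 then PySem.Int.mod r.2.1 r.2.2 else r.2.1
    scanB food_times 0 r.1 k1 0

-- ===== PRECONDITION & SPEC =====
def Spec_solution (food_times : List Int) (k : Int) (out : Int) : Prop := out = solution_alt food_times k
instance (food_times : List Int) (k : Int) (out : Int) : Decidable (Spec_solution food_times k out) := by unfold Spec_solution; infer_instance

-- ===== CLAIM (what is proved, stated in full; the proofs are below) =====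
def Claim_equal_solution : Prop := ∀ (food_times : List Int) (k : Int), Dom_solution food_times k → Spec_solution food_times k (solution food_times k)

-- ===== LEMMAS AND PROOFS =====

-- popping the leading duplicates of the minimum of a sorted list is filtering it out
theorem popEqA_eq_filter (v : Int) :
    ∀ t : List Int, t.Pairwise (· ≤ ·) → (∀ y ∈ t, v ≤ y) →
      popEqA v t = t.filter (fun y => y != v) := by
  intro t
  induction t with
  | nil => intro _ _; rfl
  | cons x xs ih =>
    intro hs hlb
    by_cases hx : x = v
    · subst hx
      simp only [popEqA, beq_self_eq_true, if_pos, List.filter_cons, bne_self_eq_false,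
        Bool.false_eq_true]
      exact ih hs.of_cons (fun y hy => hlb y (List.mem_cons_of_mem _ hy))
    · simp only [popEqA, List.filter_cons]
      rw [if_neg (by simp [hx]), if_pos (by simp [hx])]
      have hself : List.filter (fun y => y != v) xs = xs := by
        rw [List.filter_eq_self]
        intro y hy
        have h1 : x ≤ y := List.rel_of_pairwise_cons hs hy
        have h2 : v ≤ x := hlb x List.mem_cons_self
        simp only [bne_iff_ne, ne_eq]
        omega
      rw [hself]

theorem loop_eq (c : PySem.Dict Int Int) :
    ∀ (lv : List Int), ∀ (q : List Int) (d k : Int),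
      q.Pairwise (· ≤ ·) → lv.Pairwise (· < ·) → (∀ x, x ∈ lv ↔ x ∈ q) →
      (∀ v ∈ q, c.getD v 0 = (q.count v : Int)) →
      loopA q d k =
        ((loopB c lv d k (q.length : Int)).1,
         if 0 < (loopB c lv d k (q.length : Int)).2.2 ∧
            (loopB c lv d k (q.length : Int)).2.2 ≤ (loopB c lv d k (q.length : Int)).2.1
         then PySem.Int.mod (loopB c lv d k (q.length : Int)).2.1 (loopB c lv d k (q.length : Int)).2.2
         else (loopB c lv d k (q.length : Int)).2.1) := by
  intro lv
  induction lv with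
  | nil =>
    intro q d k _ _ hmem _
    have hq : q = [] := by
      cases q with
      | nil => rfl
      | cons a t => exact absurd ((hmem a).2 List.mem_cons_self) (List.not_mem_nil)
    subst hq
    simp [loopA, loopB]
  | cons v rest' ih =>
    intro q d k hsort hst hmem hcnt
    cases q with
    | nil => exact absurd ((hmem v).1 List.mem_cons_self) (List.not_mem_nil)
    | cons q0 t =>
      have hq0 : q0 = v := by
        have h1 : q0 ≤ v := by
          have hv : v ∈ q0 :: t := (hmem v).1 List.mem_cons_self
          rcases List.mem_cons.mp hv with h | h
          · omega
          · exact List.rel_of_pairwise_cons hsort h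
        have h2 : q0 ∈ v :: rest' := (hmem q0).2 List.mem_cons_self
        rcases List.mem_cons.mp h2 with h | h
        · exact h
        · have := List.rel_of_pairwise_cons hst h; omega
      subst hq0
      have hpos : (0:Int) < ((q0 :: t).length : Int) := by
        simp only [List.length_cons]; positivity
      rw [loopA]
      simp only [loopB]
      by_cases hk1 : k < ((q0 :: t).length : Int)
      · rw [if_pos hk1, if_pos (Or.inl hk1)]
        dsimp only
        rw [if_neg (by omega)]
      · by_cases hc : (q0 - d) * ((q0 :: t).length : Int) > k
        · -- A takes the k //= tot branch, then breaks; B breaks and applies the modulo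
          have hA : q0 - d > PySem.Int.floordiv k ((q0 :: t).length : Int) := by
            by_contra hcon
            have := (PySem.Int.le_floordiv_iff_mul_le hpos
              (a := k) (q := q0 - d)).mp (by omega)
            omega
          rw [if_neg hk1, if_pos hA]
          have hk := PySem.Int.floordiv_mul_add_mod k ((q0 :: t).length : Int)
          have hmlt : PySem.Int.mod k ((q0 :: t).length : Int) < ((q0 :: t).length : Int) := by
            rw [PySem.Int.mod_eq_emod_of_pos hpos]; exact Int.emod_lt_of_pos _ hpos
          have hm0 : 0 ≤ PySem.Int.mod k ((q0 :: t).length : Int) := by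
            rw [PySem.Int.mod_eq_emod_of_pos hpos]; exact Int.emod_nonneg _ (by omega)
          have hd0 : PySem.Int.floordiv
              (k - PySem.Int.floordiv k ((q0 :: t).length : Int) * ((q0 :: t).length : Int))
              ((q0 :: t).length : Int) = 0 := by
            rw [show k - PySem.Int.floordiv k ((q0 :: t).length : Int) * ((q0 :: t).length : Int)
                = PySem.Int.mod k ((q0 :: t).length : Int) from by omega]
            rw [PySem.Int.floordiv_eq_iff_of_pos hpos]
            constructor <;> omega
          rw [hd0, add_zero]
          rw [loopA]
          rw [if_pos (show k - PySem.Int.floordiv k ((q0 :: t).length : Int) *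
                ((q0 :: t).length : Int) < ((q0 :: t).length : Int) from by omega),
              if_pos (Or.inr hc)]
          dsimp only
          rw [if_pos (show (0:Int) < ((q0 :: t).length : Int) ∧
                ((q0 :: t).length : Int) ≤ k from ⟨hpos, by omega⟩)]
          rw [show PySem.Int.mod k ((q0 :: t).length : Int) =
                k - PySem.Int.floordiv k ((q0 :: t).length : Int) * ((q0 :: t).length : Int)
              from by omega]
        · -- both consume the current level
          have hA : ¬ (q0 - d > PySem.Int.floordiv k ((q0 :: t).length : Int)) := by
            have := (PySem.Int.le_floordiv_iff_mul_le hpos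
              (a := k) (q := q0 - d)).mpr (by omega)
            omega
          rw [if_neg hk1, if_neg hA,
              if_neg (show ¬ (k < ((q0 :: t).length : Int) ∨
                (q0 - d) * ((q0 :: t).length : Int) > k) from by omega)]
          have hts : t.Pairwise (· ≤ ·) := hsort.of_cons
          have hlb : ∀ y ∈ t, q0 ≤ y := fun y hy => List.rel_of_pairwise_cons hsort hy
          have hfil : popEqA q0 t = t.filter (fun y => y != q0) := popEqA_eq_filter q0 t hts hlb
          have hcv : c.getD q0 0 = (((q0 :: t).count q0 : Nat) : Int) := hcnt q0 List.mem_cons_self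
          have hlenf : ∀ l : List Int,
              (l.filter (fun y => y != q0)).length + l.count q0 = l.length := by
            intro l
            induction l with
            | nil => simp
            | cons a l ihl =>
              by_cases ha : a = q0
              · subst ha
                simp only [List.filter_cons, bne_self_eq_false, Bool.false_eq_true,
                  if_false, List.count_cons_self, List.length_cons]
                omega
              · have h1 : (a != q0) = true := by simp [ha]
                simp only [List.filter_cons, h1, if_true, List.length_cons,
                  List.count_cons, beq_iff_eq]
                rw [if_neg ha]
                omega
          have hrem : ((q0 :: t).length : Int) - c.getD q0 0 = ((popEqA q0 t).length : Int) := by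
            rw [hcv, hfil]
            have : (q0 :: t).count q0 = t.count q0 + 1 := by
              simp
            rw [this]
            have := hlenf t
            simp only [List.length_cons]
            push_cast
            omega
          rw [show d + (q0 - d) = q0 from by ring, hrem]
          apply ih
          · rw [hfil]; exact hts.filter _
          · exact hst.of_cons
          · intro x
            rw [hfil]
            simp only [List.mem_filter, bne_iff_ne, ne_eq]
            constructor
            · intro hx
              have hvx : q0 < x := List.rel_of_pairwise_cons hst hx
              have : x ∈ q0 :: t := (hmem x).1 (List.mem_cons_of_mem _ hx)
              rcases List.mem_cons.mp this with h | h
              · omega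
              · exact ⟨h, by omega⟩
            · rintro ⟨hxt, hxv⟩
              have : x ∈ q0 :: rest' := (hmem x).2 (List.mem_cons_of_mem _ hxt)
              rcases List.mem_cons.mp this with h | h
              · exact absurd h hxv
              · exact h
          · intro x hx
            rw [hfil] at hx
            have hxt : x ∈ t := (List.mem_filter.mp hx).1
            have hxv : x ≠ q0 := by
              have := (List.mem_filter.mp hx).2; simpa using this
            have h1 : c.getD x 0 = (((q0 :: t).count x : Nat) : Int) :=
              hcnt x (List.mem_cons_of_mem _ hxt)
            have h2 : (q0 :: t).count x = t.count x := by
              simp [Ne.symm hxv]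
            have h3 : (popEqA q0 t).count x = t.count x := by
              rw [hfil, List.count_filter (by simp [hxv])]
            rw [h1, h2, ← h3]

theorem scan_eq : ∀ (l : List Int) (i d k cnt : Int),
    scanA l i d (k - cnt) = scanB l i d k cnt := by
  intro l
  induction l with
  | nil => intro i d k cnt; rfl
  | cons t rest ih =>
    intro i d k cnt
    simp only [scanA, scanB]
    by_cases h : t > d
    · simp only [if_pos h]
      have : k - cnt - 1 = k - (cnt + 1) := by ring
      rw [this]
      by_cases h2 : cnt + 1 > k
      · rw [if_pos (by omega), if_pos h2]
      · rw [if_neg (by omega), if_neg h2, ih]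
    · simp only [if_neg h]
      by_cases h2 : cnt > k
      · rw [if_pos (by omega), if_pos h2]
      · rw [if_neg (by omega), if_neg h2, ih]

-- ===== VERDICT (by name: the statement is the Claim_ definition above) =====
theorem solution_spec : Claim_equal_solution := by
  unfold Claim_equal_solution
  intro food k _
  unfold Spec_solution solution solution_alt
  by_cases hg : food.sum ≤ k
  · rw [if_pos hg, if_pos hg]
  · rw [if_neg hg, if_neg hg]
    have hlen : ((food.length : Nat) : Int) =
        (((PySem.List.sorted food (fun x => x) false).length : Nat) : Int) := by
      rw [PySem.List.length_sorted]
    rw [hlen]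
    have hmain := loop_eq (PySem.Dict.counter food)
      (PySem.List.sorted (PySem.Dict.counter food).keys (fun x => x) false)
      (PySem.List.sorted food (fun x => x) false) 0 k
      (by simpa using PySem.List.sorted_pairwise food (fun x => x))
      (by rw [PySem.Dict.keys_counter]
          simpa using PySem.List.sorted_ofList_pairwise_lt food)
      (by
        intro x
        rw [PySem.List.mem_sorted, PySem.List.mem_sorted, PySem.Dict.keys_counter,
          PySem.Set.mem_ofList])
      (by
        intro v _
        rw [PySem.Dict.getD_counter]
        exact_mod_cast ((PySem.List.sorted_perm (xs := food) (key := fun x => x)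
          (rev := false)).count_eq v).symm)
    rw [hmain]
    have := scan_eq food 0
      (loopB (PySem.Dict.counter food)
        (PySem.List.sorted (PySem.Dict.counter food).keys (fun x => x) false) 0 k
        ((PySem.List.sorted food (fun x => x) false).length : Int)).1
    simpa using this _ 0
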